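-- pv_equiv track=rewrite | github.com/TomKite57/advent_of_code_2025 | py_scripts/day_06.py | pad_number_matrix
-- ===== SOURCE A (Python) =====
-- def pad_number_matrix(numbers: list[str]) -> list[str]:
--   num_total_rows = len(numbers)
--   num_total_columns = len(numbers[0])
--
--   separator_columns = set(range(num_total_columns))
--   for col in range(num_total_columns):
--     for row in range(num_total_rows):
--       if numbers[row][col] != ' ':
--         separator_columns.remove(col)
--         break
--
--   for row in range(num_total_rows):
--     new_row = []
--     for col in range(num_total_columns):
--       if col in separator_columns:
--         new_row.append(' ')
--       elif numbers[row][col] == ' ':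
--         new_row.append('0')
--       else:
--         new_row.append(numbers[row][col])
--     numbers[row] = ''.join(new_row)
--
--   return numbers
-- ===== SOURCE B (Python) =====
-- def pad_number_matrix(numbers: list[str]) -> list[str]:
--   num_total_columns = len(numbers[0])  # keep A's IndexError on an empty list
--
--   # transpose, transform each column once, then rebuild the rows
--   new_columns = []
--   for column in zip(*numbers):
--     if all(ch == ' ' for ch in column):
--       new_columns.append((' ',) * len(column))
--     else:
--       new_columns.append(tuple('0' if ch == ' ' else ch for ch in column))
--
--   for row in range(len(numbers)):
--     numbers[row] = ''.join(column[row] for column in new_columns)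
--   return numbers
-- ===== Notes on version B (the rewrite author's own statement) =====
-- stated objective: alternative
-- what changed: B transposes the matrix once (zip(*numbers)), classifies and rewrites each column in a single pass (all-space column -> spaces, otherwise ' '->'0'), and joins the transformed columns back into rows, instead of A's separator-set built by a nested column*row scan with break followed by a second nested rebuild loop.
import Mathlib
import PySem

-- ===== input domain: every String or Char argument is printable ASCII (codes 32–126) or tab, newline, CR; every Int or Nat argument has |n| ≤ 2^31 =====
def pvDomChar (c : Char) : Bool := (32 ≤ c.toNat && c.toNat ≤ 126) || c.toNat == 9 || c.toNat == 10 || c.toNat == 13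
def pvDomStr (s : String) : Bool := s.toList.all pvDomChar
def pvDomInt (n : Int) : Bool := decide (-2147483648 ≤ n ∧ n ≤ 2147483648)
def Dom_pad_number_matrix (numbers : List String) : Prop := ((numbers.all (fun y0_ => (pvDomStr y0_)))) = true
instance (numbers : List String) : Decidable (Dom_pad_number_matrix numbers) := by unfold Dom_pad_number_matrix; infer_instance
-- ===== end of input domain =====

-- B rewrites the matrix column-wise after one transpose instead of A's separator-set
-- two-phase row scans; return-value equivalence only (the Python A and B both reassign
-- numbers[row] in place, which a caller could observe).

-- ===== PORT A =====

-- numbers[row][col]; exact for in-range row/col (guaranteed wherever A reads under Pre_)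
def padA_char (numbers : List String) (row col : Nat) : Char :=
  (numbers.getD row "").toList.getD col ' '

-- 'for row in rows: if numbers[row][col] != " ": separator_columns.remove(col); break'
-- (the removed col is always present, so set.remove never raises; getD keeps the port total)
def padA_scan (numbers : List String) (col : Nat) : List Nat → PySem.Set Nat → PySem.Set Nat
  | [], s => s
  | r :: rs, s =>
      if padA_char numbers r col ≠ ' ' then (PySem.Set.remove? s col).getD s
      else padA_scan numbers col rs s

def pad_number_matrix (numbers : List String) : List String :=
  match numbers.head? with
  | none => numbers  -- Python: numbers[0] raises IndexError here (outside Pre_)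
  | some r0 =>
    let numRows := numbers.length
    let numCols := r0.length
    let sep := (List.range numCols).foldl
      (fun s col => padA_scan numbers col (List.range numRows) s)
      (PySem.Set.ofList (List.range numCols))
    (List.range numRows).map (fun row =>
      String.ofList ((List.range numCols).map (fun col =>
        if PySem.Set.contains sep col then ' '
        else if padA_char numbers row col = ' ' then '0'
        else padA_char numbers row col)))

-- ===== PORT B =====

-- zip(*rows): truncates every row to the length of the shortest row
def padB_transpose (rows : List (List Char)) : List (List Char) :=
  let m := (rows.map List.length).min?.getD 0
  (List.range m).map (fun i => rows.map (fun r => r.getD i ' '))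

-- one transformed column: all-space -> spaces, otherwise ' ' -> '0'
def padB_col (column : List Char) : List Char :=
  if column.all (fun ch => ch == ' ') then List.replicate column.length ' '
  else column.map (fun ch => if ch == ' ' then '0' else ch)

def pad_number_matrix_alt (numbers : List String) : List String :=
  match numbers.head? with
  | none => numbers  -- Python: len(numbers[0]) raises IndexError here (outside Pre_)
  | some _ =>
    let newCols := (padB_transpose (numbers.map String.toList)).map padB_col
    (List.range numbers.length).map (fun row =>
      String.ofList (newCols.map (fun c => c.getD row ' ')))

-- ===== PRECONDITION & SPEC =====
-- A raises IndexError on the empty list (numbers[0]) and on any matrix in which some row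
-- is shorter than the first row (numbers[row][col] for col < len(numbers[0])); exactly
-- those inputs are excluded.
def Pre_pad_number_matrix (numbers : List String) : Prop :=
  numbers ≠ [] ∧ ∀ s ∈ numbers, (numbers.headD "").length ≤ s.length
instance (numbers : List String) : Decidable (Pre_pad_number_matrix numbers) := by
  unfold Pre_pad_number_matrix; infer_instance

def pvWitness_pad_number_matrix : List String := [" 1  2", " 3 4 ", "   5 "]

def Spec_pad_number_matrix (numbers : List String) (out : List String) : Prop := out = pad_number_matrix_alt numbers
instance (numbers : List String) (out : List String) : Decidable (Spec_pad_number_matrix numbers out) := by unfold Spec_pad_number_matrix; infer_instance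

-- ===== CLAIM (what is proved, stated in full; the proofs are below) =====
def Claim_equal_pad_number_matrix : Prop := ∀ (numbers : List String), Dom_pad_number_matrix numbers → Pre_pad_number_matrix numbers → Spec_pad_number_matrix numbers (pad_number_matrix numbers)

-- ===== LEMMAS AND PROOFS =====

-- 'numbers[row][col] is non-space for some row in rows' (the removal condition of A's inner loop)
def padNS (numbers : List String) (rows : List Nat) (col : Nat) : Prop :=
  ∃ r ∈ rows, padA_char numbers r col ≠ ' '

lemma mem_padA_scan (numbers : List String) (col : Nat) (rows : List Nat)
    (s : PySem.Set Nat) (x : Nat) :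
    x ∈ padA_scan numbers col rows s ↔ x ∈ s ∧ ¬(x = col ∧ padNS numbers rows col) := by
  induction rows generalizing s with
  | nil => simp [padA_scan, padNS]
  | cons r rs ih =>
    by_cases h : padA_char numbers r col = ' '
    · rw [padA_scan, if_neg (not_not_intro h), ih]
      simp only [padNS, List.mem_cons]
      constructor
      · rintro ⟨hs, hn⟩
        refine ⟨hs, ?_⟩
        rintro ⟨hx, r', hr' | hr', hc⟩
        · exact hc (hr' ▸ h)
        · exact hn ⟨hx, r', hr', hc⟩
      · rintro ⟨hs, hn⟩
        exact ⟨hs, fun ⟨hx, r', hr', hc⟩ => hn ⟨hx, r', Or.inr hr', hc⟩⟩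
    · rw [padA_scan, if_pos h]
      have hNS : padNS numbers (r :: rs) col := ⟨r, List.mem_cons_self, h⟩
      by_cases hc : col ∈ s
      · rw [PySem.Set.remove?_of_mem hc, Option.getD_some, PySem.Set.mem_discard]
        constructor
        · rintro ⟨hx, hne⟩
          exact ⟨hx, fun ⟨hxc, _⟩ => hne hxc⟩
        · rintro ⟨hx, hn⟩
          exact ⟨hx, fun hxc => hn ⟨hxc, hNS⟩⟩
      · rw [(PySem.Set.remove?_eq_none_iff _ _).2 hc, Option.getD_none]
        constructor
        · intro hx
          exact ⟨hx, fun ⟨hxc, _⟩ => hc (hxc ▸ hx)⟩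
        · exact fun ⟨hx, _⟩ => hx

lemma mem_padA_fold (numbers : List String) (rows : List Nat) (cols : List Nat)
    (s : PySem.Set Nat) (x : Nat) :
    x ∈ cols.foldl (fun s col => padA_scan numbers col rows s) s ↔
      x ∈ s ∧ ¬(x ∈ cols ∧ padNS numbers rows x) := by
  induction cols generalizing s with
  | nil => simp
  | cons c cs ih =>
    simp only [List.foldl_cons]
    rw [ih, mem_padA_scan]
    simp only [List.mem_cons]
    constructor
    · rintro ⟨⟨hs, h1⟩, h2⟩
      refine ⟨hs, ?_⟩
      rintro ⟨hc | hc, hns⟩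
      · exact h1 ⟨hc, hc ▸ hns⟩
      · exact h2 ⟨hc, hns⟩
    · rintro ⟨hs, hn⟩
      exact ⟨⟨hs, fun ⟨hxc, hns⟩ => hn ⟨Or.inl hxc, hxc ▸ hns⟩⟩,
             fun ⟨hc, hns⟩ => hn ⟨Or.inr hc, hns⟩⟩

lemma foldl_min_const (L : Nat) (xs : List Nat) (h : ∀ x ∈ xs, L ≤ x) :
    xs.foldl min L = L := by
  induction xs with
  | nil => rfl
  | cons x xs ih =>
    simp only [List.foldl_cons]
    rw [min_eq_left (h x (List.mem_cons_self))]
    exact ih (fun y hy => h y (List.mem_cons_of_mem _ hy))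

-- padNS over range n says: some row of the matrix is non-space at col
lemma padNS_iff (numbers : List String) (col : Nat) :
    padNS numbers (List.range numbers.length) col ↔
      ¬ ∀ s ∈ numbers, s.toList.getD col ' ' = ' ' := by
  unfold padNS padA_char
  simp only [List.mem_range]
  constructor
  · rintro ⟨r, hr, hc⟩ hall
    apply hc
    rw [List.getD_eq_getElem numbers "" hr]
    exact hall _ (List.getElem_mem hr)
  · intro hn
    rw [not_forall] at hn
    obtain ⟨s, hs⟩ := hn
    rw [Classical.not_imp] at hs
    obtain ⟨hmem, hne⟩ := hs
    obtain ⟨r, hr, rfl⟩ := List.mem_iff_getElem.1 hmem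
    exact ⟨r, hr, by rwa [List.getD_eq_getElem numbers "" hr]⟩

lemma getD_replicate_self (k i : Nat) (c : Char) :
    (List.replicate k c).getD i c = c := by
  rcases lt_or_ge i k with h | h
  · rw [List.getD_eq_getElem _ _ (by simpa using h), List.getElem_replicate]
  · rw [List.getD_eq_default _ _ (by simpa using h)]

-- ===== VERDICT (by name: the statement is the Claim_ definition above) =====
theorem pad_number_matrix_spec : Claim_equal_pad_number_matrix := by
  intro numbers _ hpre
  unfold Spec_pad_number_matrix
  obtain ⟨hne, hle⟩ := hpre
  cases numbers with
  | nil => exact absurd rfl hne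
  | cons r0 tl =>
  simp only [List.headD_cons] at hle
  -- the shortest row is the first one: zip(*numbers) keeps all len(numbers[0]) columns
  have hmin : (((r0 :: tl).map String.toList).map List.length).min?.getD 0 = r0.length := by
    show (List.map List.length (List.map String.toList tl)).foldl min r0.toList.length
        = r0.length
    rw [String.length_toList]
    refine foldl_min_const _ _ ?_
    intro x hx
    simp only [List.map_map, List.mem_map, Function.comp] at hx
    obtain ⟨s, hs, rfl⟩ := hx
    rw [String.length_toList]
    exact hle s (List.mem_cons_of_mem _ hs)
  simp only [pad_number_matrix, pad_number_matrix_alt, List.head?_cons, padB_transpose, hmin]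
  apply List.map_congr_left
  intro row hrow
  rw [List.mem_range] at hrow
  apply congrArg String.ofList
  rw [List.map_map, List.map_map]
  apply List.map_congr_left
  intro c hc
  rw [List.mem_range] at hc
  simp only [Function.comp]
  -- the column of characters at index c
  have hcol : (List.map String.toList (r0 :: tl)).map (fun r => r.getD c ' ')
      = (r0 :: tl).map (fun s => s.toList.getD c ' ') := by
    rw [List.map_map]; rfl
  rw [hcol]
  have hsep : ∀ x, x ∈ (List.range r0.length).foldl
      (fun s col => padA_scan (r0 :: tl) col (List.range (r0 :: tl).length) s)
      (PySem.Set.ofList (List.range r0.length)) ↔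
      x < r0.length ∧ ∀ s ∈ (r0 :: tl), s.toList.getD x ' ' = ' ' := by
    intro x
    rw [mem_padA_fold, PySem.Set.mem_ofList, List.mem_range, padNS_iff]
    constructor
    · rintro ⟨h1, h2⟩
      refine ⟨h1, ?_⟩
      by_contra hall
      exact h2 ⟨h1, hall⟩
    · rintro ⟨h1, h2⟩
      exact ⟨h1, fun ⟨_, hn⟩ => hn h2⟩
  have hchar : padA_char (r0 :: tl) row c = ((r0 :: tl)[row]).toList.getD c ' ' := by
    unfold padA_char
    rw [List.getD_eq_getElem _ _ hrow]
  by_cases hall : ∀ s ∈ (r0 :: tl), s.toList.getD c ' ' = ' '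
  · -- separator column: both sides give ' '
    have hct : PySem.Set.contains ((List.range r0.length).foldl
        (fun s col => padA_scan (r0 :: tl) col (List.range (r0 :: tl).length) s)
        (PySem.Set.ofList (List.range r0.length))) c = true := by
      rw [PySem.Set.contains_iff, hsep]
      exact ⟨hc, hall⟩
    rw [if_pos hct]
    have hcall : ((r0 :: tl).map (fun s => s.toList.getD c ' ')).all
        (fun ch => ch == ' ') = true := by
      rw [List.all_eq_true]
      intro ch hch
      obtain ⟨s, hs, rfl⟩ := List.mem_map.1 hch
      exact beq_iff_eq.2 (hall s hs)
    rw [padB_col, if_pos hcall, getD_replicate_self]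
  · -- data column: spaces become '0', everything else is kept
    have hct : PySem.Set.contains ((List.range r0.length).foldl
        (fun s col => padA_scan (r0 :: tl) col (List.range (r0 :: tl).length) s)
        (PySem.Set.ofList (List.range r0.length))) c ≠ true :=
      fun h => hall ((hsep c).1 ((PySem.Set.contains_iff _ _).1 h)).2
    rw [if_neg hct]
    have hcne : ((r0 :: tl).map (fun s => s.toList.getD c ' ')).all
        (fun ch => ch == ' ') ≠ true :=
      fun hx => hall fun s hs =>
        beq_iff_eq.1 (List.all_eq_true.1 hx _ (List.mem_map.2 ⟨s, hs, rfl⟩))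
    rw [padB_col, if_neg hcne]
    have hlen : row < ((r0 :: tl).map (fun s => s.toList.getD c ' ')).length := by
      simpa using hrow
    rw [List.getD_eq_getElem _ _ (by simpa using hlen), List.getElem_map,
        List.getElem_map, hchar]
    by_cases hsp : ((r0 :: tl)[row]).toList.getD c ' ' = ' '
    · rw [if_pos hsp, if_pos (beq_iff_eq.2 hsp)]
    · rw [if_neg hsp, if_neg (fun hb => hsp (beq_iff_eq.1 hb))]
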